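-- pv_equiv track=rewrite | github.com/yangshoujian/TypoDetect | typodetect/src/lm_processor.py | diff_num
-- ===== SOURCE A (Python) =====
-- def diff_num(word1, word2): # 两个词的编辑距离
--     same, diff = 0, 0
--     same_lst = []
--     for i in range(len(word1)):
--         if word1[i] == word2[i]:
--             same += 1
--         else:
--             diff += 1
--             same_lst.append(same)
--             same = 0
--     same_lst.append(same)
--     return diff, max(same_lst)
-- ===== SOURCE B (Python) =====
-- def diff_num(word1, word2):
--     # build a match mask string, then count/split instead of a fused accumulator loop
--     s = ''.join('1' if word1[i] == word2[i] else '0' for i in range(len(word1)))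
--     return s.count('0'), max(len(run) for run in s.split('0'))
-- ===== Notes on version B (the rewrite author's own statement) =====
-- stated objective: alternative
-- what changed: Replaces A's fused accumulator loop (same/diff/same_lst updated per character) by a build-then-scan decomposition: build a '1'/'0' match-mask string, then diff = s.count('0') and max run = max of the lengths of s.split('0').
import Mathlib
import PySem

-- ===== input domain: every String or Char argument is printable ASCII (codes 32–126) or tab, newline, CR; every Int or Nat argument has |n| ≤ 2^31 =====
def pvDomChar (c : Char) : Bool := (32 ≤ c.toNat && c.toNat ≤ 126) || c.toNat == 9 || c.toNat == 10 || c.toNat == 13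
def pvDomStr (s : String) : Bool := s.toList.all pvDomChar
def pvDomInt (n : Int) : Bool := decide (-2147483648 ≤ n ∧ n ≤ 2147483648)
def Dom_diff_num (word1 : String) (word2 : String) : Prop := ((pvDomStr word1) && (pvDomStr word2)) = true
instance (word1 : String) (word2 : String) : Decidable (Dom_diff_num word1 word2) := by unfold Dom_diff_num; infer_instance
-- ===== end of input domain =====

-- B replaces A's fused accumulator loop by building a '1'/'0' match-mask string and reading
-- the answer off it with count and split (objective: alternative decomposition, same cost).

-- ===== PORT A =====
-- A's loop state: (same, diff, same_lst); at the end same_lst.append(same); max(same_lst)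
def diff_num (word1 : String) (word2 : String) : Int × Int :=
  let st := (PySem.List.pyRange 0 word1.toList.length 1).foldl
    (fun (st : Int × Int × List Int) i =>
      if PySem.List.pyGet? word1.toList i == PySem.List.pyGet? word2.toList i then
        (st.1 + 1, st.2.1, st.2.2)
      else
        (0, st.2.1 + 1, st.2.2 ++ [st.1])) (0, 0, [])
  let same_lst := st.2.2 ++ [st.1]
  (st.2.1, (PySem.List.max? same_lst (fun x => x)).getD 0)

-- ===== PORT B =====
-- s = ''.join('1' if word1[i] == word2[i] else '0' for i in range(len(word1)))
-- return s.count('0'), max(len(run) for run in s.split('0'))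
def diff_num_alt (word1 : String) (word2 : String) : Int × Int :=
  let s : List Char := (PySem.List.pyRange 0 word1.toList.length 1).map
    (fun i => if PySem.List.pyGet? word1.toList i == PySem.List.pyGet? word2.toList i then '1' else '0')
  ((s.count '0' : Int),
   (PySem.List.max? ((s.splitOn '0').map (fun run => (run.length : Int))) (fun x => x)).getD 0)

-- ===== PRECONDITION & SPEC =====
-- Pre_ excludes len(word1) > len(word2), where Python A (and Python B) raise IndexError at word2[i].
def Pre_diff_num (word1 : String) (word2 : String) : Prop :=
  word1.toList.length ≤ word2.toList.length
instance (word1 : String) (word2 : String) : Decidable (Pre_diff_num word1 word2) := by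
  unfold Pre_diff_num; infer_instance

def pvWitness_diff_num : String × String := ("abc", "abd")

def Spec_diff_num (word1 : String) (word2 : String) (out : Int × Int) : Prop := out = diff_num_alt word1 word2
instance (word1 : String) (word2 : String) (out : Int × Int) : Decidable (Spec_diff_num word1 word2 out) := by unfold Spec_diff_num; infer_instance

-- ===== CLAIM (what is proved, stated in full; the proofs are below) =====
def Claim_equal_diff_num : Prop := ∀ (word1 : String) (word2 : String), Dom_diff_num word1 word2 → Pre_diff_num word1 word2 → Spec_diff_num word1 word2 (diff_num word1 word2)

-- ===== LEMMAS AND PROOFS =====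

-- A's step, expressed on a mask character (c = '0' means mismatch)
def pvStep (st : Int × Int × List Int) (c : Char) : Int × Int × List Int :=
  if c == '0' then (0, st.2.1 + 1, st.2.2 ++ [st.1]) else (st.1 + 1, st.2.1, st.2.2)

-- the fold–split correspondence: A's final (diff, same_lst ++ [same]) read off the mask
lemma pv_key (s : List Char) : ∀ (same d : Int) (l : List Int),
    (s.foldl pvStep (same, d, l)).2.1 = d + (s.count '0' : Int) ∧
    (s.foldl pvStep (same, d, l)).2.2 ++ [(s.foldl pvStep (same, d, l)).1]
      = l ++ (same + ((s.splitOn '0').headI.length : Int))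
              :: ((s.splitOn '0').tail.map (fun p => (p.length : Int))) := by
  induction s with
  | nil => intro same d l; simp [List.splitOn, List.splitOnP_nil]
  | cons c t ih =>
    intro same d l
    obtain ⟨p, ps, hps⟩ := List.exists_cons_of_ne_nil
      (by simp [List.splitOn, List.splitOnP_ne_nil] : List.splitOn '0' t ≠ [])
    by_cases hc : c = '0'
    · subst hc
      have h1 : List.splitOn '0' ('0' :: t) = [] :: List.splitOn '0' t := by
        simp [List.splitOn, List.splitOnP_cons]
      obtain ⟨ih1, ih2⟩ := ih 0 (d + 1) (l ++ [same])
      have hstep : pvStep (same, d, l) '0' = (0, d + 1, l ++ [same]) := by simp [pvStep]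
      rw [List.foldl_cons, hstep]
      refine ⟨by rw [ih1]; simp; ring, ?_⟩
      rw [ih2, h1, hps]
      simp
    · have h1 : List.splitOn '0' (c :: t) = (c :: p) :: ps := by
        simp only [List.splitOn] at hps ⊢
        rw [List.splitOnP_cons]
        simp [hc, hps]
      obtain ⟨ih1, ih2⟩ := ih (same + 1) d l
      have hstep : pvStep (same, d, l) c = (same + 1, d, l) := by simp [pvStep, hc]
      rw [List.foldl_cons, hstep]
      refine ⟨by rw [ih1]; simp [hc], ?_⟩
      rw [ih2, hps, h1]
      simp only [List.headI_cons, List.tail_cons, List.length_cons]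
      congr 2
      push_cast
      ring

-- ===== VERDICT (by name: the statement is the Claim_ definition above) =====
theorem diff_num_spec : Claim_equal_diff_num := by
  intro word1 word2 _ _
  unfold Spec_diff_num diff_num diff_num_alt
  set n := word1.toList.length with hn
  set g : Int → Char := fun i =>
    if PySem.List.pyGet? word1.toList i == PySem.List.pyGet? word2.toList i then '1' else '0' with hg
  set s : List Char := (PySem.List.pyRange 0 n 1).map g with hs
  have hfold : (PySem.List.pyRange 0 n 1).foldl
      (fun (st : Int × Int × List Int) i =>
        if PySem.List.pyGet? word1.toList i == PySem.List.pyGet? word2.toList i then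
          (st.1 + 1, st.2.1, st.2.2)
        else
          (0, st.2.1 + 1, st.2.2 ++ [st.1])) (0, 0, []) = s.foldl pvStep (0, 0, []) := by
    rw [hs, List.foldl_map]
    congr 1
    funext st i
    by_cases h : PySem.List.pyGet? word1.toList i = PySem.List.pyGet? word2.toList i
    · simp [pvStep, hg, h]
    · simp [pvStep, hg, h]
  obtain ⟨p, ps, hps⟩ := List.exists_cons_of_ne_nil
    (by simp [List.splitOn, List.splitOnP_ne_nil] : List.splitOn '0' s ≠ [])
  obtain ⟨h1, h2⟩ := pv_key s 0 0 []
  simp only [hfold, h1, h2, hps]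
  simp
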